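-- pv_equiv track=rewrite | github.com/Unbearabl3/Project | project.py | is_lo_shu_magic_square
-- ===== SOURCE A (Python) =====
-- def is_lo_shu_magic_square(grid):
--     # Check if the grid contains 3 rows and 3 columns
--     if len(grid) != 3 or any(len(row) != 3 for row in grid):
--         return False
--
--     # Flatten the grid and check if it contains numbers 1 through 9 exactly
--     numbers = [num for row in grid for num in row]
--     if sorted(numbers) != list(range(1, 10)):
--         return False
--
--     # Calculate the sum of the first row to use as a reference
--     magic_sum = sum(grid[0])
--
--     # Check sums of all rows
--     for row in grid:
--         if sum(row) != magic_sum: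
--             return False
--
--     # Check sums of all columns
--     for col in range(3):
--         if sum(grid[row][col] for row in range(3)) != magic_sum:
--             return False
--
--     # Check sums of the two diagonals
--     if sum(grid[i][i] for i in range(3)) != magic_sum:
--         return False
--     if sum(grid[i][2 - i] for i in range(3)) != magic_sum:
--         return False
--
--     # If all checks pass, it's a Lo Shu Magic Square
--     return True
-- ===== SOURCE B (Python) =====
-- def is_lo_shu_magic_square(grid):
--     # There are exactly 8 Lo Shu magic squares (the dihedral orbit of one
--     # canonical square), so membership in that fixed orbit decides the question.
--     base = [[2, 7, 6], [9, 5, 1], [4, 3, 8]]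
--
--     def rotate(g):
--         return [[g[2 - c][r] for c in range(3)] for r in range(3)]
--
--     squares = []
--     g = base
--     for _ in range(4):
--         squares.append(g)
--         squares.append([row[::-1] for row in g])
--         g = rotate(g)
--     return grid in squares
-- ===== Notes on version B (the rewrite author's own statement) =====
-- stated objective: alternative
-- what changed: B replaces A's arithmetic validation (permutation-of-1..9 guard plus row/column/diagonal sum checks) by a table lookup: it generates the full dihedral orbit (4 rotations x reflection) of the one canonical Lo Shu square and tests membership of the grid in that fixed list of 8 squares, which are provably exactly the grids A accepts.
import Mathlib
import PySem

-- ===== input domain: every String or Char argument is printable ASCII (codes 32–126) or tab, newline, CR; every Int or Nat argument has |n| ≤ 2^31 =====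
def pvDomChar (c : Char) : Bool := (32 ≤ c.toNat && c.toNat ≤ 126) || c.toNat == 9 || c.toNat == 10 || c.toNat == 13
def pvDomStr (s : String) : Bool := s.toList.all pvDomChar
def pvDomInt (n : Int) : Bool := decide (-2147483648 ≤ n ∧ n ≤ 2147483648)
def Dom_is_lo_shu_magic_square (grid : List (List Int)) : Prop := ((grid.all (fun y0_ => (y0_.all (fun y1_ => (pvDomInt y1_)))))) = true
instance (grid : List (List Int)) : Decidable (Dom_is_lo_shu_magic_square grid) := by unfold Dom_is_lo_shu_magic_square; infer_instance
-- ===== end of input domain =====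

-- B decides the question by membership in the fixed dihedral orbit of one canonical
-- Lo Shu square (the 8 magic squares), generated by rotation/reflection, instead of
-- A's arithmetic line-sum checks (objective: alternative).

-- ===== PORT A =====
def is_lo_shu_magic_square (grid : List (List Int)) : Bool :=
  if grid.length ≠ 3 || grid.any (fun row => row.length ≠ 3) then false
  else
    let numbers := grid.flatMap (fun row => row)
    if PySem.List.sorted numbers (fun x => x) false ≠ PySem.List.pyRange 1 10 1 then false
    else
      let magic_sum := (PySem.List.pyGetD grid 0 []).sum
      -- 'for row in grid: if sum(row) != magic_sum: return False' — early-exit loop as .any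
      if grid.any (fun row => row.sum ≠ magic_sum) then false
      else if (PySem.List.pyRange 0 3 1).any (fun col =>
          ((PySem.List.pyRange 0 3 1).map
            (fun row => PySem.List.pyGetD (PySem.List.pyGetD grid row []) col 0)).sum ≠ magic_sum)
        then false
      else if ((PySem.List.pyRange 0 3 1).map
          (fun i => PySem.List.pyGetD (PySem.List.pyGetD grid i []) i 0)).sum ≠ magic_sum then false
      else if ((PySem.List.pyRange 0 3 1).map
          (fun i => PySem.List.pyGetD (PySem.List.pyGetD grid i []) (2 - i) 0)).sum ≠ magic_sum then false
      else true

-- ===== PORT B =====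
-- rotate(g) = [[g[2-c][r] for c in range(3)] for r in range(3)]
def pvRotate (g : List (List Int)) : List (List Int) :=
  (PySem.List.pyRange 0 3 1).map (fun r =>
    (PySem.List.pyRange 0 3 1).map (fun c =>
      PySem.List.pyGetD (PySem.List.pyGetD g (2 - c) []) r 0))

-- 'squares = []; g = base; for _ in range(4): squares.append(g); squares.append([row[::-1] for row in g]); g = rotate(g)'
def pvSquares : List (List (List Int)) :=
  ((PySem.List.pyRange 0 4 1).foldl
    (fun (st : List (List (List Int)) × List (List Int)) _ =>
      (st.1 ++ [st.2, st.2.map (fun row => (PySem.List.slice? row none none (-1)).getD [])],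
       pvRotate st.2))
    ([], [[2, 7, 6], [9, 5, 1], [4, 3, 8]])).1

def is_lo_shu_magic_square_alt (grid : List (List Int)) : Bool :=
  -- 'return grid in squares'
  pvSquares.contains grid

-- ===== PRECONDITION & SPEC =====
def Spec_is_lo_shu_magic_square (grid : List (List Int)) (out : Bool) : Prop := out = is_lo_shu_magic_square_alt grid
instance (grid : List (List Int)) (out : Bool) : Decidable (Spec_is_lo_shu_magic_square grid out) := by unfold Spec_is_lo_shu_magic_square; infer_instance

-- ===== CLAIM (what is proved, stated in full; the proofs are below) =====
def Claim_equal_is_lo_shu_magic_square : Prop := ∀ (grid : List (List Int)), Dom_is_lo_shu_magic_square grid → Spec_is_lo_shu_magic_square grid (is_lo_shu_magic_square grid)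

-- ===== LEMMAS AND PROOFS =====

-- the orbit B builds, evaluated once
def pvOrbit : List (List (List Int)) :=
  [[[2,7,6],[9,5,1],[4,3,8]], [[6,7,2],[1,5,9],[8,3,4]],
   [[4,9,2],[3,5,7],[8,1,6]], [[2,9,4],[7,5,3],[6,1,8]],
   [[8,3,4],[1,5,9],[6,7,2]], [[4,3,8],[9,5,1],[2,7,6]],
   [[6,1,8],[7,5,3],[2,9,4]], [[8,1,6],[3,5,7],[4,9,2]]]

-- the orbit B's loop builds, evaluated once
theorem pv_alt_eq_mem (grid : List (List Int)) :
    is_lo_shu_magic_square_alt grid = true ↔ grid ∈ pvOrbit := by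
  have hsq : pvSquares = pvOrbit := by decide
  show pvSquares.contains grid = true ↔ _
  rw [hsq]; exact List.contains_iff_mem

set_option maxHeartbeats 1600000 in
theorem pv_magic_char (a b c d e f g h i : Int)
    (ha : 1 ≤ a ∧ a ≤ 9) (hb : 1 ≤ b ∧ b ≤ 9) (hc : 1 ≤ c ∧ c ≤ 9)
    (hd : 1 ≤ d ∧ d ≤ 9) (he : 1 ≤ e ∧ e ≤ 9) (hf : 1 ≤ f ∧ f ≤ 9)
    (hg : 1 ≤ g ∧ g ≤ 9) (hh : 1 ≤ h ∧ h ≤ 9) (hi : 1 ≤ i ∧ i ≤ 9)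
    (n1 : a≠b) (n2 : a≠c) (n3 : a≠d) (n4 : a≠e) (n5 : a≠f) (n6 : a≠g) (n9 : b≠c) (n18 : c≠f)
    (h45 : a+b+c+d+e+f+g+h+i = 45)
    (h1 : d+e+f = a+b+c) (h2 : g+h+i = a+b+c)
    (h3 : a+d+g = a+b+c) (h4 : b+e+h = a+b+c) (h5 : c+f+i = a+b+c)
    (h6 : a+e+i = a+b+c) (h7 : c+e+g = a+b+c) :
    (a=2∧b=7∧c=6∧d=9∧e=5∧f=1∧g=4∧h=3∧i=8) ∨ (a=6∧b=7∧c=2∧d=1∧e=5∧f=9∧g=8∧h=3∧i=4) ∨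
    (a=4∧b=9∧c=2∧d=3∧e=5∧f=7∧g=8∧h=1∧i=6) ∨ (a=2∧b=9∧c=4∧d=7∧e=5∧f=3∧g=6∧h=1∧i=8) ∨
    (a=8∧b=3∧c=4∧d=1∧e=5∧f=9∧g=6∧h=7∧i=2) ∨ (a=4∧b=3∧c=8∧d=9∧e=5∧f=1∧g=2∧h=7∧i=6) ∨
    (a=6∧b=1∧c=8∧d=7∧e=5∧f=3∧g=2∧h=9∧i=4) ∨ (a=8∧b=1∧c=6∧d=3∧e=5∧f=7∧g=4∧h=9∧i=2) := by
  have he5 : e = 5 := by linarith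
  have hc' : c = 15 - a - b := by linarith
  have hh' : h = 10 - b := by linarith
  have hi' : i = 10 - a := by linarith
  have hg' : g = a + b - 5 := by linarith
  have hd' : d = 20 - 2*a - b := by linarith
  have hf' : f = 2*a + b - 10 := by linarith
  subst he5 hc' hh' hi' hg' hd' hf'
  clear h45 h1 h2 h3 h4 h5 h6 h7
  have ha' : a = 2 ∨ a = 4 ∨ a = 6 ∨ a = 8 := by omega
  have hb' : b = 1 ∨ b = 3 ∨ b = 7 ∨ b = 9 := by omega
  rcases ha' with rfl|rfl|rfl|rfl <;> rcases hb' with rfl|rfl|rfl|rfl <;> norm_num at *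

set_option maxHeartbeats 1600000 in
theorem is_lo_shu_helper (grid : List (List Int)) :
    is_lo_shu_magic_square grid = is_lo_shu_magic_square_alt grid := by
  rw [Bool.eq_iff_iff, pv_alt_eq_mem]
  rcases grid with _ | ⟨r0, _ | ⟨r1, _ | ⟨r2, _ | ⟨r3, rest⟩⟩⟩⟩
  · simp [is_lo_shu_magic_square, pvOrbit]
  · simp [is_lo_shu_magic_square, pvOrbit]
  · simp [is_lo_shu_magic_square, pvOrbit]
  case cons.cons.cons.nil =>
    by_cases h0 : r0.length = 3
    case neg =>
      have hA : is_lo_shu_magic_square [r0, r1, r2] = false := by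
        simp [is_lo_shu_magic_square, h0]
      rw [hA]
      simp only [Bool.false_eq_true, false_iff, pvOrbit, List.mem_cons, List.not_mem_nil,
                 or_false, not_or]
      refine ⟨?_, ?_, ?_, ?_, ?_, ?_, ?_, ?_⟩ <;> (intro h'; simp_all)
    by_cases h1 : r1.length = 3
    case neg =>
      have hA : is_lo_shu_magic_square [r0, r1, r2] = false := by
        simp [is_lo_shu_magic_square, h1]
      rw [hA]
      simp only [Bool.false_eq_true, false_iff, pvOrbit, List.mem_cons, List.not_mem_nil,
                 or_false, not_or]
      refine ⟨?_, ?_, ?_, ?_, ?_, ?_, ?_, ?_⟩ <;> (intro h'; simp_all)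
    by_cases h2 : r2.length = 3
    case neg =>
      have hA : is_lo_shu_magic_square [r0, r1, r2] = false := by
        simp [is_lo_shu_magic_square, h2]
      rw [hA]
      simp only [Bool.false_eq_true, false_iff, pvOrbit, List.mem_cons, List.not_mem_nil,
                 or_false, not_or]
      refine ⟨?_, ?_, ?_, ?_, ?_, ?_, ?_, ?_⟩ <;> (intro h'; simp_all)
    obtain ⟨a, b, c, rfl⟩ := List.length_eq_three.mp h0
    obtain ⟨d, e, f, rfl⟩ := List.length_eq_three.mp h1
    obtain ⟨g, h, i, rfl⟩ := List.length_eq_three.mp h2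
    by_cases hs : PySem.List.sorted [a,b,c,d,e,f,g,h,i] (fun x => x) false = PySem.List.pyRange 1 10 1
    case neg =>
      have hA : is_lo_shu_magic_square [[a,b,c],[d,e,f],[g,h,i]] = false := by
        simp only [is_lo_shu_magic_square]
        simp only [List.flatMap_cons, List.flatMap_nil, List.append_nil, List.cons_append,
                   List.nil_append]
        simp [hs]
      rw [hA]
      simp only [Bool.false_eq_true, false_iff, pvOrbit, List.mem_cons, List.not_mem_nil,
                 or_false, not_or]
      refine ⟨?_, ?_, ?_, ?_, ?_, ?_, ?_, ?_⟩ <;>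
        (intro h'; simp only [List.cons.injEq, and_true] at h';
         obtain ⟨⟨rfl,rfl,rfl⟩,⟨rfl,rfl,rfl⟩,rfl,rfl,rfl⟩ := h';
         exact hs (by decide))
    -- permutation facts from the sorted check
    have hp := PySem.List.sorted_perm ([a,b,c,d,e,f,g,h,i]) (fun x => x) false
    rw [hs] at hp
    have hrng : PySem.List.pyRange 1 10 1 = [1,2,3,4,5,6,7,8,9] := by decide
    rw [hrng] at hp
    have hnd : ([a,b,c,d,e,f,g,h,i] : List Int).Nodup := hp.nodup_iff.mp (by decide)
    have h45 : a + b + c + d + e + f + g + h + i = 45 := by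
      have hse := hp.sum_eq
      simp at hse
      omega
    have hbd : ∀ x ∈ ([a,b,c,d,e,f,g,h,i] : List Int), 1 ≤ x ∧ x ≤ 9 := by
      intro x hx
      have := hp.mem_iff.mpr hx
      simp only [List.mem_cons, List.not_mem_nil, or_false] at this
      rcases this with rfl|rfl|rfl|rfl|rfl|rfl|rfl|rfl|rfl <;> omega
    have ha := hbd a (by simp); have hb := hbd b (by simp); have hc := hbd c (by simp)
    have hd := hbd d (by simp); have he := hbd e (by simp); have hf := hbd f (by simp)
    have hg := hbd g (by simp); have hh := hbd h (by simp); have hi := hbd i (by simp)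
    simp only [is_lo_shu_magic_square, pvOrbit]
    simp only [List.flatMap_cons, List.flatMap_nil, List.append_nil, List.cons_append,
               List.nil_append]
    simp [hs, PySem.List.pyRange, List.range_succ, PySem.List.pyGetD, PySem.List.pyGet?,
          PySem.List.pyIdx?, List.mem_cons]
    constructor
    · rintro ⟨hr, hcol, hdg1, hdg2⟩
      have heq1 : d+e+f = a+b+c := by omega
      have heq2 : g+h+i = a+b+c := by omega
      have heq3 : a+d+g = a+b+c := by omega
      have heq4 : b+e+h = a+b+c := by omega
      have heq5 : c+f+i = a+b+c := by omega
      have heq6 : a+e+i = a+b+c := by omega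
      have heq7 : c+e+g = a+b+c := by omega
      simp only [List.nodup_cons, List.mem_cons, List.not_mem_nil, or_false, List.nodup_nil,
                 and_true, not_or] at hnd
      obtain ⟨⟨n1,n2,n3,n4,n5,n6,n7,n8⟩,⟨n9,n10,n11,n12,n13,n14,n15⟩,
              ⟨n16,n17,n18,n19,n20,n21⟩,⟨n22,n23,n24,n25,n26⟩,⟨n27,n28,n29,n30⟩,
              ⟨n31,n32,n33⟩,⟨n34,n35⟩,n36⟩ := hnd
      rcases pv_magic_char a b c d e f g h i ha hb hc hd he hf hg hh hi
          n1 n2 n3 n4 n5 n6 n9 n18 h45 heq1 heq2 heq3 heq4 heq5 heq6 heq7 with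
        ⟨rfl,rfl,rfl,rfl,rfl,rfl,rfl,rfl,rfl⟩|⟨rfl,rfl,rfl,rfl,rfl,rfl,rfl,rfl,rfl⟩|
        ⟨rfl,rfl,rfl,rfl,rfl,rfl,rfl,rfl,rfl⟩|⟨rfl,rfl,rfl,rfl,rfl,rfl,rfl,rfl,rfl⟩|
        ⟨rfl,rfl,rfl,rfl,rfl,rfl,rfl,rfl,rfl⟩|⟨rfl,rfl,rfl,rfl,rfl,rfl,rfl,rfl,rfl⟩|
        ⟨rfl,rfl,rfl,rfl,rfl,rfl,rfl,rfl,rfl⟩|⟨rfl,rfl,rfl,rfl,rfl,rfl,rfl,rfl,rfl⟩ <;>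
        norm_num
    · intro hmem
      rcases hmem with h'|h'|h'|h'|h'|h'|h'|h' <;>
        (obtain ⟨⟨rfl,rfl,rfl⟩,⟨rfl,rfl,rfl⟩,rfl,rfl,rfl⟩ := h'; refine ⟨?_, ?_, ?_, ?_⟩ <;> decide)
  · simp [is_lo_shu_magic_square, pvOrbit]

-- ===== VERDICT (by name: the statement is the Claim_ definition above) =====
theorem is_lo_shu_magic_square_spec : Claim_equal_is_lo_shu_magic_square := by
  intro grid _
  exact is_lo_shu_helper grid
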